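-- pv_equiv track=rewrite | github.com/Abyzab/SysBot.py | bots/utils/PokeCrypto.py | ShuffleArray
-- ===== SOURCE A (Python) =====
-- BlockPosition = [
--     0, 1, 2, 3,
--     0, 1, 3, 2,
--     0, 2, 1, 3,
--     0, 3, 1, 2,
--     0, 2, 3, 1,
--     0, 3, 2, 1,
--     1, 0, 2, 3,
--     1, 0, 3, 2,
--     2, 0, 1, 3,
--     3, 0, 1, 2,
--     2, 0, 3, 1,
--     3, 0, 2, 1,
--     1, 2, 0, 3,
--     1, 3, 0, 2,
--     2, 1, 0, 3,
--     3, 1, 0, 2,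
--     2, 3, 0, 1,
--     3, 2, 0, 1,
--     1, 2, 3, 0,
--     1, 3, 2, 0,
--     2, 1, 3, 0,
--     3, 1, 2, 0,
--     2, 3, 1, 0,
--     3, 2, 1, 0,
--
--     # duplicates of 0-7 to eliminate modulus
--     0, 1, 2, 3,
--     0, 1, 3, 2,
--     0, 2, 1, 3,
--     0, 3, 1, 2,
--     0, 2, 3, 1,
--     0, 3, 2, 1,
--     1, 0, 2, 3,
--     1, 0, 3, 2
-- ]
--
-- def ShuffleArray(data, sv, blockSize):
--     sdata = data.copy()
--     i = (sv * 4) & 0xFF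
--     start = 8
--     for b in range(4):
--         ofs = BlockPosition[i + b]
--         toCopy = data[start + (blockSize * ofs):start + (blockSize * ofs) + blockSize]
--         sdata = sdata[:start + (blockSize * b)] + toCopy + sdata[start + (blockSize * b) + blockSize:]
--
--     return sdata
-- ===== SOURCE B (Python) =====
-- BlockPosition = [
--     0, 1, 2, 3,
--     0, 1, 3, 2,
--     0, 2, 1, 3,
--     0, 3, 1, 2,
--     0, 2, 3, 1,
--     0, 3, 2, 1,
--     1, 0, 2, 3,
--     1, 0, 3, 2,
--     2, 0, 1, 3,
--     3, 0, 1, 2,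
--     2, 0, 3, 1,
--     3, 0, 2, 1,
--     1, 2, 0, 3,
--     1, 3, 0, 2,
--     2, 1, 0, 3,
--     3, 1, 0, 2,
--     2, 3, 0, 1,
--     3, 2, 0, 1,
--     1, 2, 3, 0,
--     1, 3, 2, 0,
--     2, 1, 3, 0,
--     3, 1, 2, 0,
--     2, 3, 1, 0,
--     3, 2, 1, 0,
--     0, 1, 2, 3,
--     0, 1, 3, 2,
--     0, 2, 1, 3,
--     0, 3, 1, 2,
--     0, 2, 3, 1,
--     0, 3, 2, 1,
--     1, 0, 2, 3,
--     1, 0, 3, 2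
-- ]
--
--
-- def ShuffleArray(data, sv, blockSize):
--     # Element-wise gather: for each output position j compute the single source
--     # index it comes from, instead of moving blocks around with slices.
--     i = (sv * 4) & 0xFF
--     end = 8 + 4 * blockSize
--     out = []
--     for j in range(len(data)):
--         if 8 <= j < end:
--             q, r = divmod(j - 8, blockSize)
--             out.append(data[8 + blockSize * BlockPosition[i + q] + r])
--         else:
--             out.append(data[j])
--     return out
-- ===== Notes on version B (the rewrite author's own statement) =====
-- stated objective: alternative
-- what changed: A moves data around: it rebuilds the whole array four times by slicing out a block and splicing it in (prefix + block + suffix per iteration); B never slices at all: it makes one pass over output positions and, for each position j, computes arithmetically (divmod into block number and offset, table lookup) the single source index data comes from, appending element by element.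
-- outside the precondition, e.g. on ShuffleArray([-3], 7, -3): A returns [-3, -3, -3], B returns [-3]; on ShuffleArray([0, 0, 0, 0, 0, 0, 0, 0, 0, 0, 0, 0], 32, 1): A raises IndexError, B raises IndexError
import Mathlib
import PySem

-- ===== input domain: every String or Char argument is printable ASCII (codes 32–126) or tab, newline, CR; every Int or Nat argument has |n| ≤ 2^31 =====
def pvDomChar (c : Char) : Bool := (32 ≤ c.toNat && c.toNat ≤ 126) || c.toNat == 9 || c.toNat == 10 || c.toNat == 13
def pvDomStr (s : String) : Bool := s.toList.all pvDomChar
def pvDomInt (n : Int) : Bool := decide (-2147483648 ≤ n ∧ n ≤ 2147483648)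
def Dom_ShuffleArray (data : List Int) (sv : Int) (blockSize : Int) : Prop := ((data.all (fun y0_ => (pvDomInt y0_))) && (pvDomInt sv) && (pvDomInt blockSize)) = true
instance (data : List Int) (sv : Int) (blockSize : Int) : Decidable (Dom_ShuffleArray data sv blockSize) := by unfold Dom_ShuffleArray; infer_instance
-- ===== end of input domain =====

-- B replaces A's four successive full-array splice-rebuilds by a single element-wise pass that
-- computes, for each output position, the source index it is gathered from (objective: alternative).

-- ===== PORT A =====
def BlockPositionL : List Int := [
  0, 1, 2, 3,  0, 1, 3, 2,  0, 2, 1, 3,  0, 3, 1, 2,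
  0, 2, 3, 1,  0, 3, 2, 1,  1, 0, 2, 3,  1, 0, 3, 2,
  2, 0, 1, 3,  3, 0, 1, 2,  2, 0, 3, 1,  3, 0, 2, 1,
  1, 2, 0, 3,  1, 3, 0, 2,  2, 1, 0, 3,  3, 1, 0, 2,
  2, 3, 0, 1,  3, 2, 0, 1,  1, 2, 3, 0,  1, 3, 2, 0,
  2, 1, 3, 0,  3, 1, 2, 0,  2, 3, 1, 0,  3, 2, 1, 0,
  0, 1, 2, 3,  0, 1, 3, 2,  0, 2, 1, 3,  0, 3, 1, 2,
  0, 2, 3, 1,  0, 3, 2, 1,  1, 0, 2, 3,  1, 0, 3, 2]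

def ShuffleArray (data : List Int) (sv : Int) (blockSize : Int) : List Int :=
  let i := PySem.Int.band (sv * 4) 255
  let start : Int := 8
  (PySem.List.pyRange 0 4 1).foldl (fun sdata b =>
    let ofs := PySem.List.pyGetD BlockPositionL (i + b) 0
    let toCopy := PySem.List.slice data (some (start + blockSize * ofs))
                    (some (start + blockSize * ofs + blockSize))
    PySem.List.slice sdata none (some (start + blockSize * b)) ++ toCopy ++
      PySem.List.slice sdata (some (start + blockSize * b + blockSize)) none) data

-- ===== PORT B =====
def ShuffleArray_alt (data : List Int) (sv : Int) (blockSize : Int) : List Int :=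
  let i := PySem.Int.band (sv * 4) 255
  let endI : Int := 8 + 4 * blockSize
  (PySem.List.pyRange 0 (data.length : Int) 1).foldl (fun out j =>
    out ++ [if 8 ≤ j ∧ j < endI then
              PySem.List.pyGetD data
                (8 + blockSize *
                    PySem.List.pyGetD BlockPositionL (i + PySem.Int.floordiv (j - 8) blockSize) 0 +
                  PySem.Int.mod (j - 8) blockSize) 0
            else PySem.List.pyGetD data j 0]) []

-- ===== PRECONDITION & SPEC =====
-- Pre_ excludes the shuffle-values on which A raises IndexError, and restricts to the function's
-- natural domain (nonnegative block size; data either at most the bare 8-byte header or holding the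
-- header plus four full blocks): on a negative block size or a partially-filled block region A still
-- returns, but the value is an accident of its successive splice-rebuilds on clamped slices
-- (misaligned or duplicated elements, sometimes even a longer list), and B's element-wise gather
-- naturally raises IndexError on part of that region instead.
def Pre_ShuffleArray (data : List Int) (sv : Int) (blockSize : Int) : Prop :=
  PySem.Int.band (sv * 4) 255 ≤ 124 ∧ 0 ≤ blockSize ∧
    ((data.length : Int) ≤ 8 ∨ 8 + 4 * blockSize ≤ (data.length : Int))
instance (data : List Int) (sv : Int) (blockSize : Int) : Decidable (Pre_ShuffleArray data sv blockSize) := by unfold Pre_ShuffleArray; infer_instance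

def pvWitness_ShuffleArray : List Int × Int × Int :=
  ([1, 2, 3, 4, 5, 6, 7, 8, 9, 10, 11, 12], 1, 1)

def Spec_ShuffleArray (data : List Int) (sv : Int) (blockSize : Int) (out : List Int) : Prop := out = ShuffleArray_alt data sv blockSize
instance (data : List Int) (sv : Int) (blockSize : Int) (out : List Int) : Decidable (Spec_ShuffleArray data sv blockSize out) := by unfold Spec_ShuffleArray; infer_instance

-- ===== CLAIM (what is proved, stated in full; the proofs are below) =====
def Claim_equal_ShuffleArray : Prop := ∀ (data : List Int) (sv : Int) (blockSize : Int), Dom_ShuffleArray data sv blockSize → Pre_ShuffleArray data sv blockSize → Spec_ShuffleArray data sv blockSize (ShuffleArray data sv blockSize)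

-- ===== LEMMAS AND PROOFS =====

-- every entry of the shuffle table is a block offset between 0 and 3
set_option maxRecDepth 8192 in
lemma BP_bound (j : Int) (h0 : 0 ≤ j) (h1 : j < 128) :
    ∃ o : Nat, PySem.List.pyGetD BlockPositionL j 0 = (o : Int) ∧ o ≤ 3 := by
  have hlenBP : BlockPositionL.length = 128 := by decide
  have hmem : PySem.List.pyGetD BlockPositionL j 0 ∈ BlockPositionL := by
    apply PySem.List.pyGetD_mem
    rw [hlenBP]
    simp [PySem.Raise.InRange]
    omega
  have hb : ∀ x ∈ BlockPositionL, 0 ≤ x ∧ x ≤ 3 := by decide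
  obtain ⟨hx0, hx3⟩ := hb _ hmem
  exact ⟨(PySem.List.pyGetD BlockPositionL j 0).toNat, by omega, by omega⟩

-- A's first splice-rebuild, on the initial state `data`
lemma splice_first (T data : List Int) (s : Nat) (A B : Int)
    (hA : A = ((8 : Nat) : Int)) (hB : B = ((8 + s : Nat) : Int)) :
    PySem.List.slice data none (some A) ++ T ++ PySem.List.slice data (some B) none
      = (data.take 8 ++ T) ++ data.drop (8 + s) := by
  subst hA hB
  rw [PySem.List.slice_to_natCast, PySem.List.slice_from_natCast]

-- one later splice-rebuild of A, on a state whose prefix P has the splice point's exact length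
lemma splice_step (P data T : List Int) (m s k : Nat) (A B : Int)
    (hA : A = ((k : Nat) : Int)) (hB : B = ((k + s : Nat) : Int)) (hP : P.length = k) :
    PySem.List.slice (P ++ data.drop m) none (some A) ++ T ++
        PySem.List.slice (P ++ data.drop m) (some B) none
      = (P ++ T) ++ data.drop (m + s) := by
  subst hA hB; subst hP
  rw [PySem.List.slice_to_natCast, PySem.List.slice_from_natCast, List.take_left' rfl]
  have hd : (P ++ data.drop m).drop (P.length + s) = data.drop (m + s) := by
    rw [List.drop_length_add_append, List.drop_drop]
  rw [hd]

-- a splice-rebuild of A leaves a list of at most the splice point's length unchanged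
lemma splice_id (sdata : List Int) (k s : Nat) (A B : Int)
    (hA : A = ((k : Nat) : Int)) (hB : B = ((k + s : Nat) : Int)) (hk : sdata.length ≤ k) :
    PySem.List.slice sdata none (some A) ++ [] ++ PySem.List.slice sdata (some B) none = sdata := by
  subst hA hB
  rw [PySem.List.slice_to_natCast, PySem.List.slice_from_natCast, List.take_of_length_le hk,
    List.drop_eq_nil_of_le (Nat.le_trans hk (Nat.le_add_right k s))]
  simp

-- B's gather over one index chunk [a, b) reading from positions m, m+1, …, m+s-1 is a block copy
lemma map_chunk (data : List Int) (F : Int → Int) (a b : Int) (m s : Nat)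
    (hab : b - a = (s : Int)) (hms : m + s ≤ data.length)
    (hF : ∀ j : Int, a ≤ j → j < b →
        F j = PySem.List.pyGetD data ((m : Int) + (j - a)) 0) :
    (PySem.List.pyRange a b 1).map F = (data.drop m).take s := by
  rw [PySem.List.pyRange_one]
  have h1 : (b - a).toNat = s := by omega
  rw [h1, List.map_map]
  apply List.ext_getElem
  · simp [List.length_take, List.length_drop]; omega
  · intro k hk1 hk2
    simp only [List.length_map, List.length_range] at hk1
    simp only [List.getElem_map, List.getElem_range, Function.comp_apply]
    rw [hF (a + (k : Int)) (by omega) (by omega)]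
    have he : ((m : Int) + ((a + (k : Int)) - a)) = ((m + k : Nat) : Int) := by
      push_cast; ring
    rw [he, PySem.List.pyGetD_natCast, List.getElem_take, List.getElem_drop,
      List.getD_eq_getElem data 0 (by omega)]

-- ===== VERDICT (by name: the statement is the Claim_ definition above) =====

set_option maxHeartbeats 1000000 in
theorem ShuffleArray_spec : Claim_equal_ShuffleArray := by
  intro data sv blockSize hdom hpre
  obtain ⟨h124, hbs0, hlen8⟩ := hpre
  unfold Spec_ShuffleArray ShuffleArray ShuffleArray_alt
  obtain ⟨s, hs⟩ := Int.eq_ofNat_of_zero_le hbs0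
  subst hs
  have hi0 : (0 : Int) ≤ PySem.Int.band (sv * 4) 255 := by
    rw [PySem.Int.band_comm]
    exact PySem.Int.band_nonneg_of_nonneg_left _ (by norm_num)
  obtain ⟨o0, ho0, hb0⟩ := BP_bound (PySem.Int.band (sv * 4) 255 + 0) (by omega) (by omega)
  obtain ⟨o1, ho1, hb1⟩ := BP_bound (PySem.Int.band (sv * 4) 255 + 1) (by omega) (by omega)
  obtain ⟨o2, ho2, hb2⟩ := BP_bound (PySem.Int.band (sv * 4) 255 + 2) (by omega) (by omega)
  obtain ⟨o3, ho3, hb3⟩ := BP_bound (PySem.Int.band (sv * 4) 255 + 3) (by omega) (by omega)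
  have hpy : PySem.List.pyRange 0 4 1 = [0, 1, 2, 3] := by decide
  rw [hpy]
  simp only [List.foldl_cons, List.foldl_nil]
  rw [ho0, ho1, ho2, ho3]
  rw [PySem.List.foldl_append_singleton_eq_map, List.nil_append]
  set G : Int → Int := fun j =>
    if 8 ≤ j ∧ j < 8 + 4 * (s : Int) then
      PySem.List.pyGetD data
        (8 + (s : Int) * PySem.List.pyGetD BlockPositionL
            (PySem.Int.band (sv * 4) 255 + PySem.Int.floordiv (j - 8) (s : Int)) 0 +
          PySem.Int.mod (j - 8) (s : Int)) 0
    else PySem.List.pyGetD data j 0 with hG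
  have hTC : ∀ o : Nat, PySem.List.slice data (some (8 + (s : Int) * (o : Int)))
      (some (8 + (s : Int) * (o : Int) + (s : Int))) = (data.drop (8 + s * o)).take s := by
    intro o
    rw [show ((8 : Int) + (s : Int) * (o : Int)) = ((8 + s * o : Nat) : Int) by push_cast; ring]
    exact PySem.List.slice_natCast_add data (8 + s * o) s
  rw [hTC o0, hTC o1, hTC o2, hTC o3]
  rcases hlen8 with hshort | hfull
  · -- data is at most the 8-byte header: A's slices clamp and B's gather branch is never taken
    have hs8 : data.length ≤ 8 := by omega
    have hd8 : ∀ o : Nat, (data.drop (8 + s * o)).take s = [] := by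
      intro o
      rw [List.drop_eq_nil_of_le (by omega)]
      simp
    rw [hd8 o0, hd8 o1, hd8 o2, hd8 o3]
    rw [splice_id data 8 s (8 + (s : Int) * 0) (8 + (s : Int) * 0 + (s : Int))
        (by push_cast; ring) (by push_cast; ring) hs8]
    rw [splice_id data (8 + s) s (8 + (s : Int) * 1) (8 + (s : Int) * 1 + (s : Int))
        (by push_cast; ring) (by push_cast; ring) (by omega)]
    rw [splice_id data (8 + s + s) s (8 + (s : Int) * 2) (8 + (s : Int) * 2 + (s : Int))
        (by push_cast; ring) (by push_cast; ring) (by omega)]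
    rw [splice_id data (8 + s + s + s) s (8 + (s : Int) * 3) (8 + (s : Int) * 3 + (s : Int))
        (by push_cast; ring) (by push_cast; ring) (by omega)]
    have cS : (PySem.List.pyRange 0 (data.length : Int) 1).map G
        = (data.drop 0).take data.length := by
      apply map_chunk data G 0 (data.length : Int) 0 data.length (by omega) (by omega)
      intro j h1 h2
      simp only [hG]
      rw [if_neg (by rintro ⟨hc, _⟩; omega)]
      congr 1
      push_cast
      ring
    rw [cS, List.drop_zero, List.take_length]
  · -- full case: the header plus four complete blocks fit in data
    have hn : 8 + 4 * s ≤ data.length := by omega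
    have hm0 : s * o0 ≤ s * 3 := Nat.mul_le_mul le_rfl hb0
    have hm1 : s * o1 ≤ s * 3 := Nat.mul_le_mul le_rfl hb1
    have hm2 : s * o2 ≤ s * 3 := Nat.mul_le_mul le_rfl hb2
    have hm3 : s * o3 ≤ s * 3 := Nat.mul_le_mul le_rfl hb3
    have l8 : (data.take 8).length = 8 := by simp; omega
    have lT0 : ((data.drop (8 + s * o0)).take s).length = s := by
      simp [List.length_take, List.length_drop]; omega
    have lT1 : ((data.drop (8 + s * o1)).take s).length = s := by
      simp [List.length_take, List.length_drop]; omega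
    have lT2 : ((data.drop (8 + s * o2)).take s).length = s := by
      simp [List.length_take, List.length_drop]; omega
    -- A's four splice-rebuilds
    rw [splice_first ((data.drop (8 + s * o0)).take s) data s (8 + (s : Int) * 0)
        (8 + (s : Int) * 0 + (s : Int)) (by push_cast; ring) (by push_cast; ring)]
    rw [splice_step (data.take 8 ++ (data.drop (8 + s * o0)).take s) data
        ((data.drop (8 + s * o1)).take s) (8 + s) s (8 + s) (8 + (s : Int) * 1)
        (8 + (s : Int) * 1 + (s : Int)) (by push_cast; ring) (by push_cast; ring)
        (by simp [List.length_append, l8, lT0])]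
    rw [splice_step ((data.take 8 ++ (data.drop (8 + s * o0)).take s) ++
          (data.drop (8 + s * o1)).take s) data
        ((data.drop (8 + s * o2)).take s) (8 + s + s) s (8 + s + s) (8 + (s : Int) * 2)
        (8 + (s : Int) * 2 + (s : Int)) (by push_cast; ring) (by push_cast; ring)
        (by simp [List.length_append, l8, lT0, lT1]; ring)]
    rw [splice_step (((data.take 8 ++ (data.drop (8 + s * o0)).take s) ++
          (data.drop (8 + s * o1)).take s) ++ (data.drop (8 + s * o2)).take s) data
        ((data.drop (8 + s * o3)).take s) (8 + s + s + s) s (8 + s + s + s) (8 + (s : Int) * 3)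
        (8 + (s : Int) * 3 + (s : Int)) (by push_cast; ring) (by push_cast; ring)
        (by simp [List.length_append, l8, lT0, lT1, lT2]; ring)]
    -- B's single pass, split into the six index chunks
    rw [PySem.List.pyRange_one_append 0 8 (data.length : Int) (by norm_num) (by omega)]
    rw [PySem.List.pyRange_one_append 8 (8 + (s : Int)) (data.length : Int) (by omega) (by omega)]
    rw [PySem.List.pyRange_one_append (8 + (s : Int)) (8 + 2 * (s : Int)) (data.length : Int)
        (by omega) (by omega)]
    rw [PySem.List.pyRange_one_append (8 + 2 * (s : Int)) (8 + 3 * (s : Int)) (data.length : Int)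
        (by omega) (by omega)]
    rw [PySem.List.pyRange_one_append (8 + 3 * (s : Int)) (8 + 4 * (s : Int)) (data.length : Int)
        (by omega) (by omega)]
    simp only [List.map_append]
    have c0 : (PySem.List.pyRange 0 8 1).map G = (data.drop 0).take 8 := by
      apply map_chunk data G 0 8 0 8 (by norm_num) (by omega)
      intro j h1 h2
      simp only [hG]
      rw [if_neg (by rintro ⟨hc, _⟩; omega)]
      congr 1
      push_cast
      ring
    have hblock : ∀ (q o : Nat) (a : Int), q ≤ 3 → a = 8 + (s : Int) * (q : Int) →
        PySem.List.pyGetD BlockPositionL (PySem.Int.band (sv * 4) 255 + (q : Int)) 0 = (o : Int) →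
        o ≤ 3 →
        (PySem.List.pyRange a (a + (s : Int)) 1).map G = (data.drop (8 + s * o)).take s := by
      intro q o a hq ha ho ho3
      have hmo : s * o ≤ s * 3 := Nat.mul_le_mul le_rfl ho3
      apply map_chunk data G a (a + (s : Int)) (8 + s * o) s (by omega) (by omega)
      intro j h1 h2
      subst ha
      have ht : (0 : Int) ≤ (s : Int) * (q : Int) := by positivity
      have hmq : (s : Int) * (q : Int) ≤ (s : Int) * 3 := by
        exact_mod_cast Nat.mul_le_mul (le_refl s) hq
      have hspos : (0 : Int) < (s : Int) := by omega
      simp only [hG]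
      rw [if_pos ⟨by omega, by nlinarith⟩]
      have hfd : PySem.Int.floordiv (j - 8) (s : Int) = (q : Int) := by
        rw [PySem.Int.floordiv_eq_iff_of_pos hspos]
        constructor
        · nlinarith
        · nlinarith
      have hfm := PySem.Int.floordiv_mul_add_mod (j - 8) (s : Int)
      rw [hfd] at hfm
      rw [hfd, ho]
      congr 1
      push_cast
      linear_combination hfm
    have c1 := hblock 0 o0 8 (by norm_num) (by push_cast; ring)
      (by rw [show ((0 : Nat) : Int) = 0 by norm_num]; exact_mod_cast ho0) hb0
    have c2 := hblock 1 o1 (8 + (s : Int)) (by norm_num) (by push_cast; ring)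
      (by exact_mod_cast ho1) hb1
    have c3 := hblock 2 o2 (8 + 2 * (s : Int)) (by norm_num) (by push_cast; ring)
      (by exact_mod_cast ho2) hb2
    have c4 := hblock 3 o3 (8 + 3 * (s : Int)) (by norm_num) (by push_cast; ring)
      (by exact_mod_cast ho3) hb3
    have ctail : (PySem.List.pyRange (8 + 4 * (s : Int)) (data.length : Int) 1).map G
        = (data.drop (8 + 4 * s)).take (data.length - (8 + 4 * s)) := by
      apply map_chunk data G (8 + 4 * (s : Int)) (data.length : Int) (8 + 4 * s)
        (data.length - (8 + 4 * s)) (by omega) (by omega)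
      intro j h1 h2
      simp only [hG]
      rw [if_neg (by rintro ⟨_, hc⟩; omega)]
      congr 1
      push_cast
      ring
    rw [c0, List.drop_zero]
    rw [show (8 + (s : Int)) + (s : Int) = 8 + 2 * (s : Int) by ring] at c2
    rw [show (8 + 2 * (s : Int)) + (s : Int) = 8 + 3 * (s : Int) by ring] at c3
    rw [show (8 + 3 * (s : Int)) + (s : Int) = 8 + 4 * (s : Int) by ring] at c4
    rw [List.take_of_length_le (by simp [List.length_drop])] at ctail
    rw [c1, c2, c3, c4, ctail]
    simp only [List.append_assoc]
    rw [show 8 + s + s + s + s = 8 + 4 * s by ring]
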